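-- pv_equiv track=rewrite | github.com/tanmayidev/dsa-solutions | freecodecamp/daily-code-challenge/2026-02-27.py | shift_matrix
-- ===== SOURCE A (Python) =====
-- def shift_matrix(matrix, shift):
--     if not matrix or not matrix[0]:
--         return matrix
--
--     rows = len(matrix)
--     cols = len(matrix[0])
--     total = rows * cols
--
--     # Normalize shift
--     shift %= total
--
--     # Flatten matrix
--     flat = [matrix[r][c] for r in range(rows) for c in range(cols)]
--
--     # Shift using slicing
--     shifted = flat[-shift:] + flat[:-shift]
--
--     # Rebuild matrix
--     result = []
--     for r in range(rows):
--         row = shifted[r * cols:(r + 1) * cols]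
--         result.append(row)
--
--     return result
-- ===== SOURCE B (Python) =====
-- def shift_matrix(matrix, shift):
--     if not matrix or not matrix[0]:
--         return matrix
--     rows = len(matrix)
--     cols = len(matrix[0])
--     total = rows * cols
--     shift %= total
--     return [[matrix[((r * cols + c - shift) % total) // cols]
--                    [((r * cols + c - shift) % total) % cols]
--              for c in range(cols)]
--             for r in range(rows)]
-- ===== Notes on version B (the rewrite author's own statement) =====
-- stated objective: simpler
-- what changed: Instead of flattening the matrix, concatenating two slices and re-chunking into rows, B fills each output cell directly from its source cell via modular index arithmetic src=(r*cols+c-shift)%total, building no intermediate flat or shifted list.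
import Mathlib
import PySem

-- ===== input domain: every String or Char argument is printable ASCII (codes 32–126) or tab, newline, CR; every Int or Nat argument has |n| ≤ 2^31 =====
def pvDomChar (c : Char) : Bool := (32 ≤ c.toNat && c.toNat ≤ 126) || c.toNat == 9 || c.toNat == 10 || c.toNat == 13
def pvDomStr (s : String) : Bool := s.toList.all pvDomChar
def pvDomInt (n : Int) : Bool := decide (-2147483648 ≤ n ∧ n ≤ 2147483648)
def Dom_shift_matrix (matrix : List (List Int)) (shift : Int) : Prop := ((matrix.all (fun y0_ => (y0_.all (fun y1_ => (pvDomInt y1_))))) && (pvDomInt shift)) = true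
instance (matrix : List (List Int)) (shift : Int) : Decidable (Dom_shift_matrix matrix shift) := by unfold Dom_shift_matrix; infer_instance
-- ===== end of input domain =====

-- B rewrites the rotate: instead of flatten / slice-concatenate / rechunk it fills each
-- output cell directly from its source cell by modular index arithmetic (objective: simpler).

-- ===== PORT A =====
def shift_matrix (matrix : List (List Int)) (shift : Int) : List (List Int) :=
  if matrix = [] ∨ matrix.headI = [] then matrix
  else
    let rows := matrix.length
    let cols := matrix.headI.length
    let total : Int := (rows : Int) * (cols : Int)
    let s := PySem.Int.mod shift total
    let flat := (List.range rows).flatMap (fun (r : Nat) =>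
      (List.range cols).map (fun (c : Nat) =>
        PySem.List.pyGetD (PySem.List.pyGetD matrix (r : Int) []) (c : Int) 0))
    let shifted := PySem.List.slice flat (some (-s)) none ++ PySem.List.slice flat none (some (-s))
    (List.range rows).foldl (fun acc (r : Nat) =>
      acc ++ [PySem.List.slice shifted (some ((r : Int) * (cols : Int)))
                                       (some (((r : Int) + 1) * (cols : Int)))]) []

-- ===== PORT B =====
def shift_matrix_alt (matrix : List (List Int)) (shift : Int) : List (List Int) :=
  if matrix = [] ∨ matrix.headI = [] then matrix
  else
    let rows := matrix.length
    let cols := matrix.headI.length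
    let total : Int := (rows : Int) * (cols : Int)
    let s := PySem.Int.mod shift total
    (List.range rows).map (fun (r : Nat) =>
      (List.range cols).map (fun (c : Nat) =>
        let src := PySem.Int.mod ((r : Int) * (cols : Int) + (c : Int) - s) total
        PySem.List.pyGetD
          (PySem.List.pyGetD matrix (PySem.Int.floordiv src (cols : Int)) [])
          (PySem.Int.mod src (cols : Int)) 0))

-- ===== PRECONDITION & SPEC =====
-- Pre_ excludes only matrices whose first row is longer than some later row: there the
-- Python A raises IndexError while flattening (and B raises too); it admits everything else.
def Pre_shift_matrix (matrix : List (List Int)) (shift : Int) : Prop :=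
  ∀ row ∈ matrix, matrix.headI.length ≤ row.length
instance (matrix : List (List Int)) (shift : Int) : Decidable (Pre_shift_matrix matrix shift) := by
  unfold Pre_shift_matrix; infer_instance

def pvWitness_shift_matrix : List (List Int) × Int := ([[1, 2], [3, 4]], 3)

def Spec_shift_matrix (matrix : List (List Int)) (shift : Int) (out : List (List Int)) : Prop := out = shift_matrix_alt matrix shift
instance (matrix : List (List Int)) (shift : Int) (out : List (List Int)) : Decidable (Spec_shift_matrix matrix shift out) := by unfold Spec_shift_matrix; infer_instance

-- ===== CLAIM (what is proved, stated in full; the proofs are below) =====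
def Claim_equal_shift_matrix : Prop := ∀ (matrix : List (List Int)) (shift : Int), Dom_shift_matrix matrix shift → Pre_shift_matrix matrix shift → Spec_shift_matrix matrix shift (shift_matrix matrix shift)

-- ===== LEMMAS AND PROOFS =====

-- length of the flattened row-major list
lemma sm_flat_len {α : Type} (g : Nat → Nat → α) (R C : Nat) :
    ((List.range R).flatMap (fun r => (List.range C).map (g r))).length = R * C := by
  induction R with
  | zero => simp
  | succ R ih => simp [List.range_succ, ih]; ring

-- element of the flattened row-major list
lemma sm_flat_get {α : Type} (g : Nat → Nat → α) (R C m : Nat) (hC : 0 < C) (hm : m < R * C) :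
    ((List.range R).flatMap (fun r => (List.range C).map (g r)))[m]? = some (g (m / C) (m % C)) := by
  induction R with
  | zero => omega
  | succ R ih =>
    rw [show List.range (R + 1) = List.range R ++ [R] from List.range_succ, List.flatMap_append]
    by_cases h : m < R * C
    · rw [List.getElem?_append_left (by rw [sm_flat_len]; exact h)]
      exact ih h
    · obtain ⟨t, ht⟩ : ∃ t, m = R * C + t := ⟨m - R * C, by omega⟩
      have htC : t < C := by
        have : m < R * C + C := by nlinarith [hm]
        omega
      have hdiv : m / C = R := by
        rw [ht, Nat.mul_comm R C, Nat.mul_add_div hC, Nat.div_eq_of_lt htC]; omega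
      have hmod : m % C = t := by
        rw [ht, Nat.mul_comm R C, Nat.mul_add_mod, Nat.mod_eq_of_lt htC]
      rw [List.getElem?_append_right (by rw [sm_flat_len]; omega), hdiv, hmod,
          sm_flat_len, ht, show R * C + t - R * C = t from by omega, List.flatMap_singleton,
          List.getElem?_map, List.getElem?_range htC]
      rfl

-- element of a rotation drop m ++ take m
lemma sm_rot_get {α : Type} (xs : List α) (m j : Nat) (hm : m ≤ xs.length) (hj : j < xs.length) :
    (xs.drop m ++ xs.take m)[j]? = xs[(j + m) % xs.length]? := by
  by_cases h : j < xs.length - m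
  · rw [List.getElem?_append_left (by simp; omega)]
    rw [List.getElem?_drop]
    congr 1
    rw [Nat.mod_eq_of_lt (by omega)]
    omega
  · rw [List.getElem?_append_right (by simp; omega)]
    have hsub : j - (xs.drop m).length = j + m - xs.length := by simp; omega
    have hlt : j + m - xs.length < m := by omega
    rw [hsub, List.getElem?_take_of_lt hlt]
    congr 1
    rw [Nat.mod_eq_sub_mod (by omega), Nat.mod_eq_of_lt (by omega)]

theorem shift_matrix_spec : Claim_equal_shift_matrix := by
  intro matrix shift _ _
  unfold Spec_shift_matrix shift_matrix shift_matrix_alt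
  by_cases hg : matrix = [] ∨ matrix.headI = []
  · simp [hg]
  · simp only [if_neg hg]
    obtain ⟨h1, h2⟩ := not_or.mp hg
    set R := matrix.length with hRdef
    set C := matrix.headI.length with hCdef
    have hR : 0 < R := List.length_pos_of_ne_nil h1
    have hC : 0 < C := List.length_pos_of_ne_nil h2
    have htot : (0 : Int) < (R : Int) * (C : Int) := by positivity
    set s := PySem.Int.mod shift ((R : Int) * (C : Int)) with hsdef
    have hs0 : 0 ≤ s := PySem.Int.mod_nonneg shift htot
    have hslt : s < (R : Int) * (C : Int) := PySem.Int.mod_lt shift htot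
    set k := s.toNat with hkdef
    have hks : s = (k : Int) := (Int.toNat_of_nonneg hs0).symm
    have hkn : k < R * C := by
      have : ((R * C : Nat) : Int) = (R : Int) * (C : Int) := by push_cast; ring
      omega
    set g : Nat → Nat → Int :=
      fun r c => PySem.List.pyGetD (PySem.List.pyGetD matrix (r : Int) []) (c : Int) 0 with hgdef
    have hflat : (List.range R).flatMap (fun r => (List.range C).map (fun c =>
        PySem.List.pyGetD (PySem.List.pyGetD matrix ((r : Nat) : Int) []) ((c : Nat) : Int) 0))
        = (List.range R).flatMap (fun r => (List.range C).map (g r)) := rfl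
    rw [hflat]
    set flat := (List.range R).flatMap (fun r => (List.range C).map (g r)) with hflatdef
    have hflatlen : flat.length = R * C := sm_flat_len g R C
    set shifted := PySem.List.slice flat (some (-s)) none ++
                   PySem.List.slice flat none (some (-s)) with hshdef
    obtain ⟨hshlen, hshget⟩ :
        shifted.length = R * C ∧
        ∀ j, j < R * C → shifted[j]? = flat[(j + (R * C - k)) % (R * C)]? := by
      by_cases hk0 : k = 0
      · have hs00 : s = 0 := by omega
        constructor
        · rw [hshdef, hs00]
          simp [PySem.List.slice_some_none, PySem.List.slice_to, hflatlen]
        · intro j hj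
          simp [hshdef, hs00, PySem.List.slice_some_none, PySem.List.slice_to,
                PySem.List.clampIdx, hk0, Nat.mod_eq_of_lt hj]
      · have hk0' : 0 < k := by omega
        rw [hshdef, hks, PySem.List.slice_from_neg_natCast flat k hk0',
            PySem.List.slice_to_neg_natCast flat k hk0', hflatlen]
        constructor
        · simp [hflatlen]
        · intro j hj
          rw [← hflatlen] at hkn hj ⊢
          exact sm_rot_get flat (flat.length - k) j (by omega) hj
    rw [PySem.List.foldl_append_singleton_eq_map]
    apply List.map_congr_left
    intro r hrm
    have hr : r < R := List.mem_range.mp hrm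
    have hrc : r * C + C ≤ R * C := by
      have := Nat.mul_le_mul_right C (Nat.succ_le_of_lt hr)
      simpa [Nat.succ_mul] using this
    have e1 : ((r : Int) * (C : Int)) = ((r * C : Nat) : Int) := by push_cast; ring
    have e2 : ((r : Int) + 1) * (C : Int) = ((r * C + C : Nat) : Int) := by push_cast; ring
    rw [e1, e2, PySem.List.slice_natCast, Nat.add_sub_cancel_left]
    apply List.ext_getElem?
    intro i
    by_cases hi : i < C
    · -- both sides are defined; compare the elements
      have hji : r * C + i < R * C := by omega
      set j' := (r * C + i + (R * C - k)) % (R * C) with hj'def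
      have hj'lt : j' < R * C := Nat.mod_lt _ (by positivity)
      -- left side: i-th element of the r-th chunk of shifted
      have hL : ((shifted.drop (r * C)).take C)[i]? = flat[j']? := by
        rw [List.getElem?_take_of_lt hi, List.getElem?_drop]
        exact hshget (r * C + i) hji
      rw [hL, sm_flat_get g R C j' hC hj'lt]
      -- right side: the direct modular lookup
      rw [List.getElem?_map, List.getElem?_range hi]
      have hsrc : PySem.Int.mod (((r * C : Nat) : Int) + (i : Int) - s)
          ((R : Int) * (C : Int)) = (j' : Int) := by
        have ecast : ((r * C : Nat) : Int) + (i : Int) - s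
            = ((r * C + i + (R * C - k) : Nat) : Int) - ((R * C : Nat) : Int) := by
          rw [hks]
          push_cast [Nat.cast_sub (le_of_lt hkn)]
          ring
        rw [PySem.Int.mod_eq_emod_of_pos htot, ecast,
            show ((R * C : Nat) : Int) = (R : Int) * (C : Int) from by push_cast; ring]
        rw [show (R : Int) * (C : Int) = ((R * C : Nat) : Int) from by push_cast; ring,
            Int.sub_emod_right, ← Int.natCast_mod]
      simp only [Option.map_some]
      rw [hsrc]
      simp only [PySem.Int.floordiv_natCast, PySem.Int.mod_natCast, hgdef]
    · -- both sides are out of range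
      rw [List.getElem?_eq_none (by rw [List.length_take, List.length_drop, hshlen]; omega),
          List.getElem?_eq_none (by simp; omega)]
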